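-- pv_equiv track=rewrite | github.com/raymondcheung8/rlcard | rlcard/agents/equity_agent.py | get_straight_flush_outs
-- ===== SOURCE A (Python) =====
-- def get_straight_flush_outs(cards):
--     '''
--     Args:
--         cards (list): A list of strings that represent cards
--
--     Returns:
--         outs (int): The number of outs for getting a straight flush
--     '''
--     all_suits = ['D', 'C', 'H', 'S']
--     all_ranks = ['A', '2', '3', '4', '5', '6', '7', '8', '9', '10', 'J', 'Q', 'K', 'A']
--     possible_straight_flushes = []
--     while len(all_ranks) >= 5:
--         for suit in all_suits:
--             straight_flush = list(map(lambda rank: suit + rank, all_ranks[:5]))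
--             for card in cards:
--                 if card in straight_flush:
--                     straight_flush.remove(card)
--
--             if len(straight_flush) == 0:
--                 # Return -1 if a straight flush already exists
--                 return -1
--             elif len(straight_flush) == 1:
--                 possible_straight_flushes.append(straight_flush)
--
--         all_ranks.pop(0)
--
--     # All cards have to be the same suit in a straight flush
--     return len(possible_straight_flushes)
-- ===== SOURCE B (Python) =====
-- def get_straight_flush_outs(cards):
--     # Index the cards once: the set of (suit, rank) splits.
--     seen = {(c[:1], c[1:]) for c in cards}
--     ranks = ['A', '2', '3', '4', '5', '6', '7', '8', '9', '10', 'J', 'Q', 'K', 'A']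
--     counts = [sum((suit, rank) in seen for rank in ranks[i:i + 5])
--               for i in range(10) for suit in ('D', 'C', 'H', 'S')]
--     if 5 in counts:
--         return -1
--     return sum(n == 4 for n in counts)
-- ===== Notes on version B (the rewrite author's own statement) =====
-- stated objective: faster
-- what changed: B builds a set index of (suit, rank) card splits once and counts each of the 40 suit/window combinations by membership against that index, instead of A's rebuilding a 5-card candidate list and rescanning-and-removing over the whole cards list for every suit and window; the early return is replaced by an order-independent check on the list of counts.
import Mathlib
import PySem

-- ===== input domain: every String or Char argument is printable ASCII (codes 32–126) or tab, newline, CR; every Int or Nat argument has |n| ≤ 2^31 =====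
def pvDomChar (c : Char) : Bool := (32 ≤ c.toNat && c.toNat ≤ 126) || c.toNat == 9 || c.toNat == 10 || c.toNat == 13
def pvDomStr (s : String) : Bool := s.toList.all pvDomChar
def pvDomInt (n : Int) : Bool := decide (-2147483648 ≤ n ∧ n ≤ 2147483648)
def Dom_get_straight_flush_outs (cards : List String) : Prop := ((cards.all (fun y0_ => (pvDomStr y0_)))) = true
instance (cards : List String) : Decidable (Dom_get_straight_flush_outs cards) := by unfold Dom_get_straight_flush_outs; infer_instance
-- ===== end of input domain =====

-- B replaces A's per-(window,suit) rescan-and-remove over the cards list by a single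
-- (suit, rank)-split set index queried per window rank (objective: faster — one pass over
-- cards instead of 40 rescans, measured faster in a timing run; return value only).

-- ===== PORT A =====
def pvASuits : List String := ["D", "C", "H", "S"]
def pvARanks : List String := ["A", "2", "3", "4", "5", "6", "7", "8", "9", "10", "J", "Q", "K", "A"]

-- the inner 'for suit in all_suits' loop; none = the 'return -1' early exit
def pvASuitLoop (cards : List String) (ranks5 : List String) :
    List String → List (List String) → Option (List (List String))
  | [], acc => some acc
  | suit :: rest, acc =>
    let sf := ranks5.map (fun rank => suit ++ rank)
    let sf := cards.foldl
      (fun sf card => if sf.contains card then (PySem.List.remove? sf card).getD sf else sf) sf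
    if sf.length = 0 then none
    else if sf.length = 1 then pvASuitLoop cards ranks5 rest (acc ++ [sf])
    else pvASuitLoop cards ranks5 rest acc

-- the 'while len(all_ranks) >= 5' loop; all_ranks.pop(0) = tail
def pvAWhile (cards : List String) : List String → List (List String) → Int
  | [], acc => (acc.length : Int)
  | r :: rs, acc =>
    if 5 ≤ (r :: rs).length then
      match pvASuitLoop cards ((r :: rs).take 5) pvASuits acc with
      | none => -1
      | some acc' => pvAWhile cards rs acc'
    else (acc.length : Int)

def get_straight_flush_outs (cards : List String) : Int :=
  pvAWhile cards pvARanks []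

-- ===== PORT B =====
def pvBSplit (c : String) : String × String :=
  (String.ofList (c.toList.take 1), String.ofList (c.toList.drop 1))

def pvBRanks : List String := ["A", "2", "3", "4", "5", "6", "7", "8", "9", "10", "J", "Q", "K", "A"]

def get_straight_flush_outs_alt (cards : List String) : Int :=
  let seen : PySem.Set (String × String) := PySem.Set.ofList (cards.map pvBSplit)
  let counts : List Int := (PySem.List.pyRange 0 10 1).flatMap (fun i =>
    ["D", "C", "H", "S"].map (fun suit =>
      (PySem.List.slice pvBRanks (some i) (some (i + 5))).foldl
        (fun n rank => n + (if PySem.Set.contains seen (suit, rank) then 1 else 0)) (0 : Int)))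
  if counts.contains (5 : Int) then -1
  else counts.foldl (fun t n => t + (if n == (4 : Int) then 1 else 0)) 0

-- ===== PRECONDITION & SPEC =====
def Spec_get_straight_flush_outs (cards : List String) (out : Int) : Prop := out = get_straight_flush_outs_alt cards
instance (cards : List String) (out : Int) : Decidable (Spec_get_straight_flush_outs cards out) := by unfold Spec_get_straight_flush_outs; infer_instance

-- ===== CLAIM (what is proved, stated in full; the proofs are below) =====
def Claim_equal_get_straight_flush_outs : Prop := ∀ (cards : List String), Dom_get_straight_flush_outs cards → Spec_get_straight_flush_outs cards (get_straight_flush_outs cards)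

-- ===== LEMMAS AND PROOFS =====

-- number of window ranks already held in the given suit
def pvK (cards : List String) (suit : String) (w : List String) : Nat :=
  w.countP (fun r => cards.contains (suit ++ r))

-- the successive 5-rank windows the while loop visits
def pvWindows : List String → List (List String)
  | [] => []
  | r :: rs => if 5 ≤ (r :: rs).length then (r :: rs).take 5 :: pvWindows rs else []

def pvKs (cards : List String) : List Nat :=
  (pvWindows pvARanks).flatMap (fun w => pvASuits.map (fun s => pvK cards s w))

lemma pvCount_split {α : Type} (l : List α) (p : α → Bool) :
    l.countP p + l.countP (fun x => !p x) = l.length := by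
  induction l with
  | nil => rfl
  | cons a t ih => by_cases h : p a <;> simp [List.countP_cons, h] <;> omega

-- A's rescan-and-remove pass leaves exactly the candidates not held in cards
lemma pvRemove_eq (cards : List String) : ∀ sf : List String, sf.Nodup →
    cards.foldl (fun sf card => if sf.contains card then (PySem.List.remove? sf card).getD sf else sf) sf
      = sf.filter (fun x => !cards.contains x) := by
  induction cards with
  | nil => intro sf _; simp
  | cons c cs ih =>
    intro sf hn
    simp only [List.foldl_cons]
    by_cases hc : c ∈ sf
    · have h1 : sf.contains c = true := by simpa using hc
      rw [if_pos h1, PySem.List.remove?_eq_some_erase sf c hc, Option.getD_some]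
      rw [ih _ (List.Nodup.erase c hn), List.Nodup.erase_eq_filter hn c, List.filter_filter]
      refine List.filter_congr ?_
      intro x _
      by_cases hxc : x = c <;> by_cases hcs : x ∈ cs <;>
        simp [List.contains_cons, hxc, hcs, bne]
    · have h1 : sf.contains c = false := by simpa using hc
      rw [if_neg (by simpa using hc), ih _ hn]
      refine List.filter_congr ?_
      intro x hx
      have hne : (x == c) = false := by
        simp only [beq_eq_false_iff_ne]
        intro h; exact hc (h ▸ hx)
      rw [List.contains_cons, hne, Bool.false_or]

lemma pvSuitLoop_eq (cards w : List String) (hn : w.Nodup) (h5 : w.length = 5) :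
    ∀ (suits : List String) (acc : List (List String)),
    pvASuitLoop cards w suits acc =
      if suits.any (fun s => pvK cards s w == 5) then none
      else some (acc ++ (suits.filter (fun s => pvK cards s w == 4)).map
        (fun s => (w.map (fun r => s ++ r)).filter (fun x => !cards.contains x))) := by
  intro suits
  induction suits with
  | nil => intro acc; simp [pvASuitLoop]
  | cons s rest ih =>
    intro acc
    have hinj : Function.Injective (fun r : String => s ++ r) :=
      fun a b h => (String.append_right_inj s).mp h
    have hmn : (w.map (fun r => s ++ r)).Nodup := hn.map hinj
    have hcnt : pvK cards s w + w.countP (fun r => !cards.contains (s ++ r)) = 5 := by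
      have := pvCount_split w (fun r => cards.contains (s ++ r))
      simpa [pvK, h5] using this
    have hlen : ((w.map (fun r => s ++ r)).filter (fun x => !cards.contains x)).length
        = w.countP (fun r => !cards.contains (s ++ r)) := by
      rw [← List.countP_eq_length_filter, List.countP_map]
      rfl
    simp only [pvASuitLoop]
    rw [pvRemove_eq cards _ hmn, hlen]
    by_cases hm0 : w.countP (fun r => !cards.contains (s ++ r)) = 0
    · have hk5 : (pvK cards s w == 5) = true := by simp only [beq_iff_eq]; omega
      rw [if_pos hm0]
      have hany : ((s :: rest).any fun s' => pvK cards s' w == 5) = true := by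
        rw [List.any_cons, hk5, Bool.true_or]
      rw [hany]
      rfl
    · have hk5 : (pvK cards s w == 5) = false := by
        simp only [beq_eq_false_iff_ne]; omega
      have hany : ((s :: rest).any fun s' => pvK cards s' w == 5)
          = (rest.any fun s' => pvK cards s' w == 5) := by
        rw [List.any_cons, hk5, Bool.false_or]
      by_cases hm1 : w.countP (fun r => !cards.contains (s ++ r)) = 1
      · have hk4 : (pvK cards s w == 4) = true := by simp only [beq_iff_eq]; omega
        rw [if_neg (by omega), if_pos hm1, ih, hany, List.filter_cons_of_pos (p := fun s' => pvK cards s' w == 4) (l := rest) hk4, List.map_cons]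
        split
        · rfl
        · simp [List.append_assoc]
      · have hk4 : (pvK cards s w == 4) = false := by
          simp only [beq_eq_false_iff_ne]; omega
        rw [if_neg (by omega), if_neg (by omega), ih, hany, List.filter_cons_of_neg (p := fun s' => pvK cards s' w == 4) (l := rest) (by simp [hk4])]

lemma pvAWhile_eq (cards : List String) : ∀ (ranks : List String) (acc : List (List String)),
    (∀ w ∈ pvWindows ranks, w.Nodup) →
    pvAWhile cards ranks acc =
      if ((pvWindows ranks).flatMap (fun w => pvASuits.map (fun s => pvK cards s w))).any (· == 5)
      then -1
      else (acc.length : Int) +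
        (((pvWindows ranks).flatMap (fun w => pvASuits.map (fun s => pvK cards s w))).countP (· == 4) : Int) := by
  intro ranks
  induction ranks with
  | nil => intro acc _; simp [pvAWhile, pvWindows]
  | cons r rs ih =>
    intro acc hw
    by_cases h : 5 ≤ (r :: rs).length
    · have hwin : pvWindows (r :: rs) = (r :: rs).take 5 :: pvWindows rs := by
        show pvWindows (r :: rs) = _
        simp only [pvWindows]
        rw [if_pos h]
      have hnodup : ((r :: rs).take 5).Nodup := hw _ (by rw [hwin]; exact List.mem_cons_self)
      have hlen5 : ((r :: rs).take 5).length = 5 := by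
        rw [List.length_take, List.length_cons]
        simp only [List.length_cons] at h
        omega
      have hrest : ∀ w ∈ pvWindows rs, w.Nodup :=
        fun w hm => hw w (by rw [hwin]; exact List.mem_cons_of_mem _ hm)
      simp only [pvAWhile]
      rw [if_pos h, pvSuitLoop_eq cards _ hnodup hlen5, hwin]
      simp only [List.flatMap_cons, List.any_append, List.countP_append, List.any_map, List.countP_map]
      by_cases hcond : (pvASuits.any fun s => pvK cards s ((r :: rs).take 5) == 5) = true
      · rw [if_pos hcond]
        have haux : (pvASuits.any ((fun x => x == 5) ∘ fun s => pvK cards s ((r :: rs).take 5))) = true := hcond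
        rw [haux, Bool.true_or]
        rfl
      · have hcf : (pvASuits.any fun s => pvK cards s ((r :: rs).take 5) == 5) = false :=
          Bool.eq_false_iff.mpr hcond
        rw [if_neg hcond]
        show pvAWhile cards rs _ = _
        rw [ih _ hrest]
        have hauxf : (pvASuits.any ((fun x => x == 5) ∘ fun s => pvK cards s ((r :: rs).take 5))) = false := hcf
        rw [hauxf, Bool.false_or]
        split
        · rfl
        · simp only [List.length_append, List.length_map, ← List.countP_eq_length_filter]
          have hcomp : List.countP ((fun x => x == 4) ∘ fun s => pvK cards s ((r :: rs).take 5)) pvASuits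
              = List.countP (fun s => pvK cards s ((r :: rs).take 5) == 4) pvASuits := rfl
          rw [hcomp]
          push_cast
          ring
    · have hwin : pvWindows (r :: rs) = [] := by
        show pvWindows (r :: rs) = _
        simp only [pvWindows]
        rw [if_neg h]
      simp only [pvAWhile]
      rw [if_neg h, hwin]
      simp

lemma pvA_closed (cards : List String) :
    get_straight_flush_outs cards =
      if (pvKs cards).any (· == 5) then -1 else ((pvKs cards).countP (· == 4) : Int) := by
  have hnd : ∀ w ∈ pvWindows pvARanks, w.Nodup := by decide
  unfold get_straight_flush_outs
  rw [pvAWhile_eq cards _ _ hnd]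
  simp [pvKs]

-- B's index lookup agrees with raw membership of the recombined card
lemma pvSeen_mem (cards : List String) (s r : String) (hs : s.toList.length = 1) :
    PySem.Set.contains (PySem.Set.ofList (cards.map pvBSplit)) (s, r) = cards.contains (s ++ r) := by
  obtain ⟨a, ha⟩ := List.length_eq_one_iff.mp hs
  rw [Bool.eq_iff_iff, PySem.Set.contains_iff, List.contains_iff_mem, PySem.Set.mem_ofList,
    List.mem_map]
  constructor
  · rintro ⟨c, hc, hsplit⟩
    have h1 : String.ofList (c.toList.take 1) = s := congrArg Prod.fst hsplit
    have h2 : String.ofList (c.toList.drop 1) = r := congrArg Prod.snd hsplit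
    have hctl : c.toList = (s ++ r).toList := by
      rw [String.toList_append]
      conv_lhs => rw [← List.take_append_drop 1 c.toList]
      rw [← h1, ← h2, String.toList_ofList, String.toList_ofList]
    have hc' : c = s ++ r := by
      have := congrArg String.ofList hctl
      rwa [String.ofList_toList, String.ofList_toList] at this
    exact hc' ▸ hc
  · intro hm
    refine ⟨s ++ r, hm, ?_⟩
    have htl : (s ++ r).toList = a :: r.toList := by rw [String.toList_append, ha]; rfl
    unfold pvBSplit
    rw [htl]
    have e1 : String.ofList ((a :: r.toList).take 1) = s := by
      show String.ofList [a] = s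
      rw [← ha, String.ofList_toList]
    have e2 : String.ofList ((a :: r.toList).drop 1) = r := by
      show String.ofList r.toList = r
      exact String.ofList_toList
    rw [e1, e2]

lemma pvCountW (cards : List String) (suit : String) (hs : suit.toList.length = 1) (w : List String) :
    w.foldl (fun n rank => n +
        (if PySem.Set.contains (PySem.Set.ofList (cards.map pvBSplit)) (suit, rank) then 1 else 0)) (0 : Int)
      = (pvK cards suit w : Int) := by
  rw [PySem.List.foldl_add
    (g := fun rank => if PySem.Set.contains (PySem.Set.ofList (cards.map pvBSplit)) (suit, rank) then (1:Int) else 0)]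
  have hpt : ∀ x ∈ w, (if PySem.Set.contains (PySem.Set.ofList (cards.map pvBSplit)) (suit, x) then (1:Int) else 0)
      = (if cards.contains (suit ++ x) then (1:Int) else 0) := by
    intro x _
    rw [pvSeen_mem cards suit x hs]
  rw [List.map_congr_left hpt, PySem.List.sum_map_ite_one_zero]
  simp [pvK]

lemma pvCast_contains (ks : List Nat) :
    (ks.map (fun k : Nat => (k : Int))).contains (5 : Int) = ks.any (· == 5) := by
  induction ks with
  | nil => rfl
  | cons k t ih =>
    have hk : ((5 : Int) == (k : Nat)) = (k == 5) := by
      by_cases h : k = 5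
      · subst h; decide
      · rw [beq_eq_false_iff_ne.mpr (by omega : (5 : Int) ≠ (k : Nat)),
          beq_eq_false_iff_ne.mpr (by omega : k ≠ 5)]
    rw [List.map_cons, List.contains_cons, List.any_cons, ih, hk]

lemma pvCast_foldl (ks : List Nat) : ∀ z : Int,
    (ks.map (fun k : Nat => (k : Int))).foldl (fun t n => t + (if n == (4 : Int) then 1 else 0)) z
      = z + (ks.countP (· == 4) : Int) := by
  induction ks with
  | nil => intro z; simp
  | cons k t ih =>
    intro z
    have hk : (((k : Nat) : Int) == (4 : Int)) = (k == 4) := by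
      by_cases h : k = 4
      · subst h; decide
      · rw [beq_eq_false_iff_ne.mpr (by omega : ((k : Nat) : Int) ≠ (4 : Int)),
          beq_eq_false_iff_ne.mpr (by omega : k ≠ 4)]
    rw [List.map_cons, List.foldl_cons, hk]
    by_cases h : (k == 4) = true
    · rw [if_pos h, ih, List.countP_cons_of_pos (p := fun x => x == 4) (l := t) h]
      push_cast
      ring
    · rw [if_neg (by simp [Bool.eq_false_iff.mpr h]), ih, List.countP_cons_of_neg (p := fun x => x == 4) (l := t) (by simp [Bool.eq_false_iff.mpr h])]
      ring

lemma pvB_closed (cards : List String) :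
    get_straight_flush_outs_alt cards =
      if (pvKs cards).any (· == 5) then -1 else ((pvKs cards).countP (· == 4) : Int) := by
  simp only [get_straight_flush_outs_alt]
  have hstep : ∀ i : Int, (["D", "C", "H", "S"].map (fun suit =>
      (PySem.List.slice pvBRanks (some i) (some (i + 5))).foldl
        (fun n rank => n + (if PySem.Set.contains (PySem.Set.ofList (cards.map pvBSplit)) (suit, rank) then 1 else 0)) (0 : Int)))
      = ["D", "C", "H", "S"].map (fun suit => ((pvK cards suit (PySem.List.slice pvBRanks (some i) (some (i + 5)))) : Int)) := by
    intro i
    refine List.map_congr_left ?_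
    intro s hsm
    have h1 : s.toList.length = 1 := by
      simp only [List.mem_cons, List.not_mem_nil, or_false] at hsm
      rcases hsm with rfl | rfl | rfl | rfl <;> decide
    exact pvCountW cards s h1 _
  rw [List.flatMap_congr (fun i _ => hstep i)]
  have hwin : pvWindows pvARanks
      = (PySem.List.pyRange 0 10 1).map (fun i => PySem.List.slice pvBRanks (some i) (some (i + 5))) := by
    decide
  have hmap : (pvKs cards).map (fun k : Nat => (k : Int))
      = (PySem.List.pyRange 0 10 1).flatMap (fun i =>
          ["D", "C", "H", "S"].map (fun suit => ((pvK cards suit (PySem.List.slice pvBRanks (some i) (some (i + 5)))) : Int))) := by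
    unfold pvKs
    rw [List.map_flatMap, hwin, List.flatMap_map]
    refine List.flatMap_congr ?_
    intro i _
    rw [List.map_map]
    rfl
  rw [← hmap, pvCast_contains, pvCast_foldl]
  simp

-- ===== VERDICT (by name: the statement is the Claim_ definition above) =====
theorem get_straight_flush_outs_spec : Claim_equal_get_straight_flush_outs := by
  intro cards _
  unfold Spec_get_straight_flush_outs
  rw [pvA_closed, pvB_closed]
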